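-- pv_equiv track=rewrite | github.com/kyleaforrester/logic_puzzle | puzzle_generator.py | y_count
-- ===== SOURCE A (Python) =====
-- def y_count(grid, board_ind=None, row=None, col=None):
--     count = 0
--
--     if (board_ind is None):
--         for k in range(len(grid)):
--             count += y_count(grid, k)
--     elif (row is None and col is None):
--         for j in range(len(grid[board_ind])):
--             count += y_count(grid, board_ind, j)
--     elif (row is not None and col is None):
--         for i in range(len(grid[board_ind][row])):
--             if (grid[board_ind][row][i] == 'Y'):
--                 count += 1
--     elif (row is None and col is not None):
--         for j in range(len(grid[board_ind])):
--             if (grid[board_ind][j][col] == 'Y'):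
--                 count += 1
--
--     return count
-- ===== SOURCE B (Python) =====
-- def y_count(grid, board_ind=None, row=None, col=None):
--     if board_ind is None:
--         return sum(cell == 'Y' for board in grid for r in board for cell in r)
--     if row is None and col is None:
--         return sum(cell == 'Y' for r in grid[board_ind] for cell in r)
--     if row is not None and col is None:
--         return sum(cell == 'Y' for cell in grid[board_ind][row])
--     if row is None:
--         return sum(r[col] == 'Y' for r in grid[board_ind])
--     return 0
-- ===== Notes on version B (the rewrite author's own statement) =====
-- stated objective: simpler
-- what changed: Replaces A's two-level recursion (dispatch that re-calls y_count per board and per row) by a single non-recursive dispatch that counts 'Y' cells directly with flat comprehensions over the nested lists.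
import Mathlib
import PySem

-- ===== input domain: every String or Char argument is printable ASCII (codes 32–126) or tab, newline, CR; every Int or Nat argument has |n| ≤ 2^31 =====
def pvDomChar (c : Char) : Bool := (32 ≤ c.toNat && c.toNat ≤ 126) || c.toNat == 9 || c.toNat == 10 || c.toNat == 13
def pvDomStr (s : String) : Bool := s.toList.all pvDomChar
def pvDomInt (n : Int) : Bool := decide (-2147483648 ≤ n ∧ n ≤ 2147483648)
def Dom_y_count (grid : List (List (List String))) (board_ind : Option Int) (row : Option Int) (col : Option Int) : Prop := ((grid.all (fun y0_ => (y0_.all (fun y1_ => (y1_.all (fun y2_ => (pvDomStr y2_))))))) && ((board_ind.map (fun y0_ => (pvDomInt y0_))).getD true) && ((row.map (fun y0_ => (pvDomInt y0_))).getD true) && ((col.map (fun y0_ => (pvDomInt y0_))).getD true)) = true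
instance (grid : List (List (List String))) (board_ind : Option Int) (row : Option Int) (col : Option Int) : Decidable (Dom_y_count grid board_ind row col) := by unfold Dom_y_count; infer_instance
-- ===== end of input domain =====

-- B replaces A's two-level recursion by direct non-recursive counting over the nested lists (objective: simpler).

-- ===== PORT A =====
-- Literal port of A's recursive dispatch; list indexing inside the for-range loops is
-- pyGetD (always in range there); grid[board_ind] / board[row] use pyGetD too, exact under Pre_.
def y_count (grid : List (List (List String))) (board_ind : Option Int) (row : Option Int) (col : Option Int) : Int :=
  match board_ind with
  | none =>
      (PySem.List.pyRange 0 (PySem.List.len grid)).foldl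
        (fun count k => count + y_count grid (some k) none none) 0
  | some b =>
      match row, col with
      | none, none =>
          (PySem.List.pyRange 0 (PySem.List.len (PySem.List.pyGetD grid b []))).foldl
            (fun count j => count + y_count grid (some b) (some j) none) 0
      | some r, none =>
          (PySem.List.pyRange 0 (PySem.List.len (PySem.List.pyGetD (PySem.List.pyGetD grid b []) r []))).foldl
            (fun count i => if PySem.List.pyGetD (PySem.List.pyGetD (PySem.List.pyGetD grid b []) r []) i "" = "Y" then count + 1 else count) 0
      | none, some c =>
          (PySem.List.pyRange 0 (PySem.List.len (PySem.List.pyGetD grid b []))).foldl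
            (fun count j => if PySem.List.pyGetD (PySem.List.pyGetD (PySem.List.pyGetD grid b []) j []) c "" = "Y" then count + 1 else count) 0
      | some _, some _ => 0
termination_by (match board_ind with
  | none => 2
  | some _ => match row, col with | none, none => 1 | _, _ => 0 : Nat)
decreasing_by all_goals simp

-- ===== PORT B =====
def y_count_alt (grid : List (List (List String))) (board_ind : Option Int) (row : Option Int) (col : Option Int) : Int :=
  match board_ind with
  | none => Int.ofNat ((grid.flatMap (fun board => board.flatMap (fun r => r))).count "Y")
  | some b =>
      match row, col with
      | none, none =>
          Int.ofNat (((PySem.List.pyGetD grid b []).flatMap (fun r => r)).count "Y")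
      | some r, none =>
          Int.ofNat ((PySem.List.pyGetD (PySem.List.pyGetD grid b []) r []).count "Y")
      | none, some c =>
          Int.ofNat (((PySem.List.pyGetD grid b []).map (fun r => PySem.List.pyGetD r c "")).count "Y")
      | some _, some _ => 0

-- ===== PRECONDITION & SPEC =====
-- Pre_ excludes exactly the inputs where Python A raises IndexError: an out-of-range
-- board_ind or row, or a column index out of range for some row of the chosen board;
-- when board_ind is none, or all three indices are given, A never indexes and is total.
def Pre_y_count (grid : List (List (List String))) (board_ind : Option Int) (row : Option Int) (col : Option Int) : Prop :=
  match board_ind, row, col with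
  | none, _, _ => True
  | some _, some _, some _ => True
  | some b, none, none => PySem.Raise.InRange grid.length b
  | some b, some r, none => PySem.Raise.InRange grid.length b ∧
      PySem.Raise.InRange (PySem.List.pyGetD grid b []).length r
  | some b, none, some c => PySem.Raise.InRange grid.length b ∧
      ∀ r ∈ PySem.List.pyGetD grid b [], PySem.Raise.InRange r.length c
instance (grid : List (List (List String))) (board_ind : Option Int) (row : Option Int) (col : Option Int) : Decidable (Pre_y_count grid board_ind row col) := by
  unfold Pre_y_count
  rcases board_ind with _ | b <;> rcases row with _ | r <;> rcases col with _ | c <;> dsimp only <;> infer_instance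

def pvWitness_y_count : List (List (List String)) × Option Int × Option Int × Option Int :=
  ([[["Y", "N"], ["N", "Y"]], [["Y"]]], some 0, none, some 1)

def Spec_y_count (grid : List (List (List String))) (board_ind : Option Int) (row : Option Int) (col : Option Int) (out : Int) : Prop := out = y_count_alt grid board_ind row col
instance (grid : List (List (List String))) (board_ind : Option Int) (row : Option Int) (col : Option Int) (out : Int) : Decidable (Spec_y_count grid board_ind row col out) := by unfold Spec_y_count; infer_instance

-- ===== CLAIM (what is proved, stated in full; the proofs are below) =====
def Claim_equal_y_count : Prop := ∀ (grid : List (List (List String))) (board_ind : Option Int) (row : Option Int) (col : Option Int), Dom_y_count grid board_ind row col → Pre_y_count grid board_ind row col → Spec_y_count grid board_ind row col (y_count grid board_ind row col)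

-- ===== LEMMAS AND PROOFS =====

-- summing per-row 'Y' counts is counting over the flattened board
theorem foldl_count_flatMap (bs : List (List String)) (init : Int) :
    bs.foldl (fun c r => c + Int.ofNat (r.count "Y")) init
      = init + Int.ofNat ((bs.flatMap (fun r => r)).count "Y") := by
  induction bs generalizing init with
  | nil => simp
  | cons b bs ih =>
      rw [List.foldl_cons, ih, List.flatMap_cons, List.count_append]
      simp only [Int.ofNat_eq_natCast, Nat.cast_add]
      ring

-- summing per-board 'Y' counts is counting over the doubly flattened grid
theorem foldl_count_flatMap2 (gs : List (List (List String))) (init : Int) :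
    gs.foldl (fun c bd => c + Int.ofNat ((bd.flatMap (fun r => r)).count "Y")) init
      = init + Int.ofNat ((gs.flatMap (fun bd => bd.flatMap (fun r => r))).count "Y") := by
  induction gs generalizing init with
  | nil => simp
  | cons g gs ih =>
      rw [List.foldl_cons, ih, List.flatMap_cons, List.count_append]
      simp only [Int.ofNat_eq_natCast, Nat.cast_add]
      ring

-- an if-count fold over a list of strings is List.count
theorem foldl_if_count (xs : List String) :
    xs.foldl (fun count s => if s = "Y" then count + 1 else count) 0
      = Int.ofNat (xs.count "Y") := by
  rw [show (fun (count : Int) (s : String) => if s = "Y" then count + 1 else count)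
        = (fun (count : Int) (s : String) => if (s == "Y") = true then count + 1 else count) by
      funext c s; simp]
  rw [PySem.List.foldl_count_if (fun s => s == "Y")]
  simp [List.count]

-- A's row-scan branch counts the 'Y's of that row
theorem y_count_row (grid : List (List (List String))) (b r : Int) :
    y_count grid (some b) (some r) none
      = Int.ofNat ((PySem.List.pyGetD (PySem.List.pyGetD grid b []) r []).count "Y") := by
  rw [y_count]
  rw [PySem.List.foldl_pyRange_zero_pyGetD _ "" (fun count s => if s = "Y" then count + 1 else count) 0]
  exact foldl_if_count _

-- A's per-board branch counts the 'Y's of that board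
theorem y_count_board (grid : List (List (List String))) (b : Int) :
    y_count grid (some b) none none
      = Int.ofNat (((PySem.List.pyGetD grid b []).flatMap (fun r => r)).count "Y") := by
  rw [y_count]
  simp only [y_count_row]
  rw [PySem.List.foldl_pyRange_zero_pyGetD _ ([] : List String)
        (fun count r => count + Int.ofNat (r.count "Y")) 0]
  rw [foldl_count_flatMap]
  simp

-- ===== VERDICT (by name: the statement is the Claim_ definition above) =====
theorem y_count_spec : Claim_equal_y_count := by
  intro grid board_ind row col _ _
  unfold Spec_y_count
  match board_ind with
  | none =>
      rw [y_count]
      simp only [y_count_board]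
      rw [PySem.List.foldl_pyRange_zero_pyGetD _ ([] : List (List String))
            (fun count bd => count + Int.ofNat ((bd.flatMap (fun r => r)).count "Y")) 0]
      rw [foldl_count_flatMap2]
      simp [y_count_alt]
  | some b =>
      match row, col with
      | none, none => rw [y_count_board]; rfl
      | some r, none => rw [y_count_row]; rfl
      | none, some c =>
          rw [y_count]
          rw [PySem.List.foldl_pyRange_zero_pyGetD _ ([] : List String)
                (fun count r => if PySem.List.pyGetD r c "" = "Y" then count + 1 else count) 0]
          show _ = Int.ofNat (((PySem.List.pyGetD grid b []).map (fun r => PySem.List.pyGetD r c "")).count "Y")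
          rw [show (fun (count : Int) (r : List String) => if PySem.List.pyGetD r c "" = "Y" then count + 1 else count)
                = (fun (count : Int) (r : List String) => if ((PySem.List.pyGetD r c "") == "Y") = true then count + 1 else count) by
              funext cnt r; simp]
          rw [PySem.List.foldl_count_if (fun r => (PySem.List.pyGetD r c "") == "Y")]
          simp [List.count, List.countP_map, Function.comp_def]
      | some _, some _ => rw [y_count]; rfl
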